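-- pv_equiv track=rewrite | github.com/ssDhp/bt-Pico | code/lib/utils.py | expand_fmt_str
-- ===== SOURCE A (Python) =====
-- VALID_CHARS = {
--     "b",
--     "B",
--     "h",
--     "H",
--     "i",
--     "I",
--     "l",
--     "L",
--     "q",
--     "Q",
--     "e",
--     "f",
--     "d",
--     "s",
--     "P",
-- }
--
-- BYTE_ORDER_CHARS = {
--     "@",
--     "<",
--     ">",
--     "!",
-- }
--
-- def expand_fmt_str(source_fmt_str: str) -> str:
--     """Coverts alpha-numerice format string into expanded format strings
--
--     Ex: expand_fmt_str(">2b10H") -> ">bbHHHHHHHHHH"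
--
--     Args:
--         source_fmt_str (str): Compressed format string
--
--     Raises:
--         ValueError: If last character in the format string is numeric.
--         ValueError: If unrecognised/unknown character is found in the format string.
--
--     Returns:
--         str: Expanded format string
--     """
--
--     if type(source_fmt_str) != str:
--         raise ValueError(
--             f"Expected object of class 'str', recieved argument of type {type(source_fmt_str)}"
--         )
--
--     if source_fmt_str[-1].isdigit():
--         raise ValueError(f"Invalid format string!")
--
--     expanded_str = ""
--     num_str = ""
--
--     for current_index, current_char in enumerate(source_fmt_str):
--
--         if current_index == 0 and current_char in BYTE_ORDER_CHARS:
--             expanded_str += current_char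
--
--         elif current_char.isdigit():
--             num_str += current_char
--
--         elif current_char in VALID_CHARS:
--             str_multiplier = 1 if num_str == "" else int(num_str)
--             expanded_str += str_multiplier * current_char
--             num_str = ""
--
--         else:
--             raise ValueError(
--                 f"Invalid format string! Invalid/Unkown char at index {current_index}"
--             )
--
--     return expanded_str
-- ===== SOURCE B (Python) =====
-- import re
--
-- VALID_CHARS = {"b","B","h","H","i","I","l","L","q","Q","e","f","d","s","P"}
-- BYTE_ORDER_CHARS = {"@","<",">","!"}
--
-- def expand_fmt_str(source_fmt_str: str) -> str:
--     if type(source_fmt_str) != str: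
--         raise ValueError(
--             f"Expected object of class 'str', recieved argument of type {type(source_fmt_str)}"
--         )
--
--     if source_fmt_str[-1].isdigit():
--         raise ValueError(f"Invalid format string!")
--
--     parts = []
--     for m in re.finditer(r"(\d*)(\D)", source_fmt_str):
--         count, char = m.group(1), m.group(2)
--         if m.start(2) == 0 and char in BYTE_ORDER_CHARS:
--             parts.append(char)
--         elif char in VALID_CHARS:
--             parts.append(char * (int(count) if count else 1))
--         else:
--             raise ValueError(
--                 f"Invalid format string! Invalid/Unkown char at index {m.start(2)}"
--             )
--     return "".join(parts)
-- ===== Notes on version B (the rewrite author's own statement) =====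
-- stated objective: idiomatic
-- what changed: Replaced A's char-by-char loop with its num_str accumulator state machine by a regex tokenizer (re.finditer over (digit-run, non-digit) tokens) that processes the string token by token.
import Mathlib
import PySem

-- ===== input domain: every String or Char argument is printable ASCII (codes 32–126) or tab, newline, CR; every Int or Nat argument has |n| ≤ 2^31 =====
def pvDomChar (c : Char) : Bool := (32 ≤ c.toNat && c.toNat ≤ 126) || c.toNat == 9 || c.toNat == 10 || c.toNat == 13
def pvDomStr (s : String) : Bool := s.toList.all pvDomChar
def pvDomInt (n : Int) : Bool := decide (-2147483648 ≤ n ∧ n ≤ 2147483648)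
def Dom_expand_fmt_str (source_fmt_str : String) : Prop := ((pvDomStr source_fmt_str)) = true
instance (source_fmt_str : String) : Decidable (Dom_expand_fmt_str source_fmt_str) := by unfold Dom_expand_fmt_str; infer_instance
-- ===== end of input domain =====

-- B replaces A's char-by-char num_str state machine by a regex-style tokenizer over
-- (digit-run, non-digit-char) tokens; objective: idiomatic, same cost; equal on all
-- inputs where A returns (A's raises are excluded by Pre_).

def pvVALID : List Char := ['b','B','h','H','i','I','l','L','q','Q','e','f','d','s','P']
def pvBYTE_ORDER : List Char := ['@','<','>','!']

-- int(num_str) on a nonempty all-digit string (both Pythons call int on digit runs)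
def pvDigitsVal (ds : List Char) : Nat := ds.foldl (fun a c => a * 10 + (c.toNat - 48)) 0

-- ===== PORT A =====
-- the for-loop of A: state (index, expanded_str, num_str); none = the ValueError branch
def pvLoopA : List Char → Nat → List Char → List Char → Option (List Char)
  | [], _, exp, _ => some exp
  | c :: rest, i, exp, num =>
    if i = 0 ∧ c ∈ pvBYTE_ORDER then
      pvLoopA rest (i + 1) (exp ++ [c]) num
    else if PySem.Chars.isdigit c then
      pvLoopA rest (i + 1) exp (num ++ [c])
    else if c ∈ pvVALID then
      pvLoopA rest (i + 1) (exp ++ List.replicate (if num = [] then 1 else pvDigitsVal num) c) []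
    else
      none

def expand_fmt_str (source_fmt_str : String) : String :=
  match PySem.List.pyGet? source_fmt_str.toList (-1) with
  | none => ""                                   -- Python: IndexError (excluded by Pre_)
  | some last =>
    if PySem.Chars.isdigit last then ""          -- Python: ValueError (excluded by Pre_)
    else
      match pvLoopA source_fmt_str.toList 0 [] [] with
      | some e => String.mk e
      | none => ""                               -- Python: ValueError (excluded by Pre_)

-- ===== PORT B =====
-- re.finditer(r"(\d*)(\D)", s): successive (digit-run, non-digit char) tokens
def pvTokens : List Char → List (List Char × Char)
  | [] => []
  | c :: cs =>
    if PySem.Chars.isdigit c then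
      match pvTokens cs with
      | [] => []                                 -- trailing digits: no further match
      | (ds, ch) :: ts => ((c :: ds), ch) :: ts
    else
      ([], c) :: pvTokens cs

-- B's loop over matches; pos = start index of the current match; none = ValueError
def pvLoopB : List (List Char × Char) → Nat → List Char → Option (List Char)
  | [], _, acc => some acc
  | (ds, c) :: rest, pos, acc =>
    if pos + ds.length = 0 ∧ c ∈ pvBYTE_ORDER then
      pvLoopB rest (pos + ds.length + 1) (acc ++ [c])
    else if c ∈ pvVALID then
      pvLoopB rest (pos + ds.length + 1)
        (acc ++ List.replicate (if ds = [] then 1 else pvDigitsVal ds) c)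
    else
      none

def expand_fmt_str_alt (source_fmt_str : String) : String :=
  match PySem.List.pyGet? source_fmt_str.toList (-1) with
  | none => ""                                   -- Python: IndexError (excluded by Pre_)
  | some last =>
    if PySem.Chars.isdigit last then ""          -- Python: ValueError (excluded by Pre_)
    else
      match pvLoopB (pvTokens source_fmt_str.toList) 0 [] with
      | some e => String.mk e
      | none => ""                               -- Python: ValueError (excluded by Pre_)

-- ===== PRECONDITION & SPEC =====
-- Pre_ excludes exactly the inputs where A raises: the empty string (IndexError),
-- a trailing digit (ValueError), and any char that is neither a digit, nor a valid
-- type char, nor a byte-order char at index 0 (ValueError). B raises identically there.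
def Pre_expand_fmt_str (source_fmt_str : String) : Prop :=
  source_fmt_str.toList ≠ [] ∧
  PySem.Chars.isdigit (source_fmt_str.toList.getLastD ' ') = false ∧
  ∀ p ∈ PySem.List.enumerate source_fmt_str.toList 0,
    PySem.Chars.isdigit p.2 = true ∨ p.2 ∈ pvVALID ∨ (p.1 = 0 ∧ p.2 ∈ pvBYTE_ORDER)

instance (source_fmt_str : String) : Decidable (Pre_expand_fmt_str source_fmt_str) := by
  unfold Pre_expand_fmt_str; infer_instance

def pvWitness_expand_fmt_str : String := ">2b10H"

def Spec_expand_fmt_str (source_fmt_str : String) (out : String) : Prop := out = expand_fmt_str_alt source_fmt_str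
instance (source_fmt_str : String) (out : String) : Decidable (Spec_expand_fmt_str source_fmt_str out) := by unfold Spec_expand_fmt_str; infer_instance

-- ===== CLAIM (what is proved, stated in full; the proofs are below) =====
def Claim_equal_expand_fmt_str : Prop := ∀ (source_fmt_str : String), Dom_expand_fmt_str source_fmt_str → Pre_expand_fmt_str source_fmt_str → Spec_expand_fmt_str source_fmt_str (expand_fmt_str source_fmt_str)

-- ===== LEMMAS AND PROOFS =====

-- A absorbs a leading digit run into num_str one char at a time
theorem pvLoopA_digits (ds : List Char) (hds : ∀ d ∈ ds, PySem.Chars.isdigit d = true) :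
    ∀ (cs : List Char) (i : Nat) (exp num : List Char),
    pvLoopA (ds ++ cs) i exp num = pvLoopA cs (i + ds.length) exp (num ++ ds) := by
  induction ds with
  | nil => intro cs i exp num; simp
  | cons d ds ih =>
    intro cs i exp num
    have hd : PySem.Chars.isdigit d = true := hds d (List.mem_cons_self ..)
    have hbo : ¬ (i = 0 ∧ d ∈ pvBYTE_ORDER) := by
      rintro ⟨_, hmem⟩
      fin_cases hmem <;> simp [PySem.Chars.isdigit] at hd
    rw [List.cons_append]
    show pvLoopA (d :: (ds ++ cs)) i exp num = _
    rw [pvLoopA, if_neg hbo, if_pos hd,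
        ih (fun x hx => hds x (List.mem_cons_of_mem _ hx)) cs (i + 1) exp (num ++ [d])]
    simp only [List.append_assoc, List.singleton_append, List.length_cons]
    congr 1
    omega

theorem pvTokens_digits (ds : List Char) (hds : ∀ d ∈ ds, PySem.Chars.isdigit d = true)
    (c : Char) (hc : PySem.Chars.isdigit c = false) (rest : List Char) :
    pvTokens (ds ++ c :: rest) = (ds, c) :: pvTokens rest := by
  induction ds with
  | nil => simp [pvTokens, hc]
  | cons d ds ih =>
    have hd : PySem.Chars.isdigit d = true := hds d (List.mem_cons_self ..)
    rw [List.cons_append]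
    show pvTokens (d :: (ds ++ c :: rest)) = _
    rw [pvTokens, if_pos hd, ih (fun x hx => hds x (List.mem_cons_of_mem _ hx))]

theorem pvTokens_all_digits (ds : List Char) (hds : ∀ d ∈ ds, PySem.Chars.isdigit d = true) :
    pvTokens ds = [] := by
  induction ds with
  | nil => rfl
  | cons d ds ih =>
    have hd : PySem.Chars.isdigit d = true := hds d (List.mem_cons_self ..)
    rw [pvTokens, if_pos hd, ih (fun x hx => hds x (List.mem_cons_of_mem _ hx))]

-- the central invariant: at a token boundary (num_str empty) A's loop equals B's loop
theorem pvLoop_eq (n : Nat) : ∀ (cs : List Char), cs.length ≤ n → ∀ (pos : Nat) (acc : List Char),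
    pvLoopA cs pos acc [] = pvLoopB (pvTokens cs) pos acc := by
  induction n with
  | zero =>
    intro cs hn pos acc
    have : cs = [] := List.eq_nil_of_length_eq_zero (by omega)
    subst this; rfl
  | succ n ih =>
    intro cs hn pos acc
    rcases h : cs.dropWhile (fun c => PySem.Chars.isdigit c) with _ | ⟨c, rest⟩
    · -- all digits (or empty)
      have hall : ∀ d ∈ cs, PySem.Chars.isdigit d = true := by
        intro d hd
        have := List.dropWhile_eq_nil_iff.mp h d hd
        simpa using this
      have h1 : cs = cs ++ ([] : List Char) := by simp
      rw [pvTokens_all_digits cs hall]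
      conv_lhs => rw [h1]
      rw [pvLoopA_digits cs hall [] pos acc []]
      rfl
    · -- cs = ds ++ c :: rest with ds the leading digit run, c not a digit
      have hsplit : cs = cs.takeWhile (fun c => PySem.Chars.isdigit c) ++ c :: rest := by
        conv_lhs => rw [← List.takeWhile_append_dropWhile (p := fun c => PySem.Chars.isdigit c) (l := cs)]
        rw [h]
      set ds := cs.takeWhile (fun c => PySem.Chars.isdigit c) with hdsdef
      have hds : ∀ d ∈ ds, PySem.Chars.isdigit d = true := by
        intro d hd; simpa using List.mem_takeWhile_imp hd
      have hc : PySem.Chars.isdigit c = false := by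
        have := List.head?_dropWhile_not (p := fun c => PySem.Chars.isdigit c) (l := cs)
        rw [h] at this; simpa using this
      have hlen : rest.length ≤ n := by
        have := congrArg List.length hsplit
        simp at this; omega
      rw [hsplit, pvLoopA_digits ds hds (c :: rest) pos acc [],
          pvTokens_digits ds hds c hc rest]
      simp only [List.nil_append]
      rw [pvLoopA, pvLoopB]
      by_cases hbo : pos + ds.length = 0 ∧ c ∈ pvBYTE_ORDER
      · rw [if_pos hbo, if_pos hbo]
        have hds0 : ds = [] := List.eq_nil_of_length_eq_zero (by omega)
        rw [hds0]
        simpa using ih rest hlen (pos + 0 + 1) (acc ++ [c])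
      · rw [if_neg hbo, if_neg hbo, if_neg (by simp [hc])]
        by_cases hv : c ∈ pvVALID
        · rw [if_pos hv, if_pos hv]
          exact ih rest hlen (pos + ds.length + 1) _
        · rw [if_neg hv, if_neg hv]

-- ===== VERDICT (by name: the statement is the Claim_ definition above) =====
theorem expand_fmt_str_spec : Claim_equal_expand_fmt_str := by
  intro s _ _
  unfold Spec_expand_fmt_str expand_fmt_str expand_fmt_str_alt
  rw [pvLoop_eq s.toList.length s.toList (le_refl _) 0 []]
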